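-- pv_equiv track=rewrite | github.com/Gom3rye/CodingTest | 프로그래머스/3/84021. 퍼즐 조각 채우기/퍼즐 조각 채우기.py | solution
-- ===== SOURCE A (Python) =====
-- from collections import deque
--
-- def rotate(spots):
--     result = []
--     for r, c in spots:
--         result.append((c, -r)) # cw로 90도 회전: (r,c) => (c,-r)
--     min_r, min_c = min(r for r, _ in result), min(c for _, c in result)
--     # 0,0으로 모는 정규화 (0,0을 기준으로 정렬되어 있음)
--     return sorted((r-min_r, c-min_c) for r, c in result)
--
-- def bfs(board, n, x, y, target):
--     result = [(x,y)] # 빈칸/좌표만 모아서 정규화 후 반환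
--     q = deque([(x, y)])
--     board[x][y] = 1-target # 방문 처리 (1->0, 0->1)
--     while q:
--         x, y = q.popleft()
--         for nx, ny in [(x+1,y),(x-1,y),(x,y+1),(x,y-1)]:
--             if 0<=nx<n and 0<=ny<n and board[nx][ny] == target:
--                 board[nx][ny] = 1-target # 방문 처리
--                 result.append((nx, ny))
--                 q.append((nx, ny))
--
--     # 정규화 해서 리턴!
--     min_x, min_y = min(x for x, _ in result), min(y for _, y in result)
--     return sorted((x-min_x, y-min_y) for x, y in result)
--
-- def solution(game_board, table):
--     n = len(table)
--     # 게임보드의 빈칸 좌표들 수집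
--     spaces = []
--     for i in range(n):
--         for j in range(n):
--             if game_board[i][j] == 0:
--                 spaces.append(bfs(game_board, n, i, j, 0))
--
--     # table의 실제 좌표 수집
--     puzzles = []
--     for i in range(n):
--         for j in range(n):
--             if table[i][j] == 1:
--                 puzzles.append(bfs(table, n, i, j, 1))
--
--     # 실제 모든 puzzle을 space와 비교해보며 완탐!
--     answer = 0 # 최대한 채워넣은 칸 수
--     used = [False]*len(puzzles)
--     for space in spaces:
--         for i in range(len(puzzles)):
--             puzzle = puzzles[i]
--             # 이미 쓴 퍼즐이거나 칸 수가 다르다면 볼 것도 없음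
--             if used[i] or len(space) != len(puzzle):
--                 continue
--             # 4번 회전해보며 딱 맞는지 탐색
--             temp = puzzle
--             found = False
--             for dir in range(4):
--                 if temp == space:
--                     answer += len(puzzle)
--                     found = True
--                     used[i] = True
--                     break
--                 temp = rotate(temp)
--             if found:
--                 break
--     return answer
-- ===== SOURCE B (Python) =====
-- # B: extracts regions with a frontier-by-frontier (level-order) flood fill instead of
-- # A's deque BFS, and replaces A's greedy space-by-puzzle rotation scan by hashing each
-- # shape's canonical form (min of its 4 rotations) into Counters and summing
-- # min(space_count, puzzle_count) * size per class.  Like A, B mutates game_board and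
-- # table in place (the equivalence is about the return value).
-- from collections import Counter
--
--
-- def normalize(cells):
--     mr = min(r for r, _ in cells)
--     mc = min(c for _, c in cells)
--     return sorted((r - mr, c - mc) for r, c in cells)
--
--
-- def rot90(cells):
--     return normalize([(c, -r) for r, c in cells])
--
--
-- def fill(board, n, sr, sc, target):
--     mark = 1 - target
--     cells = [(sr, sc)]
--     board[sr][sc] = mark
--     frontier = [(sr, sc)]
--     while frontier:
--         nxt = []
--         for cr, cc in frontier:
--             for nr, nc in ((cr + 1, cc), (cr - 1, cc), (cr, cc + 1), (cr, cc - 1)):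
--                 if 0 <= nr < n and 0 <= nc < n and board[nr][nc] == target:
--                     board[nr][nc] = mark
--                     cells.append((nr, nc))
--                     nxt.append((nr, nc))
--         frontier = nxt
--     return normalize(cells)
--
--
-- def shapes(board, n, target):
--     out = []
--     for i in range(n):
--         for j in range(n):
--             if board[i][j] == target:
--                 out.append(fill(board, n, i, j, target))
--     return out
--
--
-- def canonical(cells):
--     rots = [cells]
--     for _ in range(3):
--         rots.append(rot90(rots[-1]))
--     return min(rots)
--
--
-- def solution(game_board, table):
--     n = len(table)
--     sc = Counter(tuple(canonical(s)) for s in shapes(game_board, n, 0))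
--     pc = Counter(tuple(canonical(p)) for p in shapes(table, n, 1))
--     return sum(min(v, pc[k]) * len(k) for k, v in sc.items())
-- ===== Notes on version B (the rewrite author's own statement) =====
-- stated objective: alternative
-- what changed: B extracts each region with a frontier-by-frontier (level-order) flood fill instead of A's one-cell-at-a-time deque BFS, and replaces A's greedy space-by-puzzle rotation scan by hashing each shape's canonical form (min of its 4 rotations) into Counters and summing min(space_count, puzzle_count) * size per class; the matching stage drops from O(spaces*puzzles*size) to O((spaces+puzzles)*size), though total time stays dominated by the O(n^2) extraction.
import Mathlib
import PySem

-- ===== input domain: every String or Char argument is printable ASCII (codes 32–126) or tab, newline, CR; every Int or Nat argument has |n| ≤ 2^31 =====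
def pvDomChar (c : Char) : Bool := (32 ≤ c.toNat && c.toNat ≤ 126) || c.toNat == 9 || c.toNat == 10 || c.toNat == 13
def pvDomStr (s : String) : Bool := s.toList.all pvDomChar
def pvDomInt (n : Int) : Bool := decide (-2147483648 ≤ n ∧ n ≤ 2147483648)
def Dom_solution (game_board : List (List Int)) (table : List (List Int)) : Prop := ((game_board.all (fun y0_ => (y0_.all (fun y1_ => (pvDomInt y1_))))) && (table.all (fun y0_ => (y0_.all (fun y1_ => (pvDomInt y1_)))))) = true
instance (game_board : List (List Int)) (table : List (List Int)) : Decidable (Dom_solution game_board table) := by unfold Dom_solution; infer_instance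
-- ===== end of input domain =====

-- B extracts regions with a frontier-by-frontier (level-order) flood fill instead of
-- A's deque BFS, and replaces A's greedy space-by-puzzle rotation scan by canonical-form
-- (min of 4 rotations) counters.  Like A, the Python B mutates game_board and table in
-- place; the equivalence proved here is about the return value.

-- ===== PORT A =====

-- board[x][y], evaluated like Python: board[x] first, then [y]; none = IndexError
def pvCellGet? (board : List (List Int)) (x y : Int) : Option Int :=
  match PySem.List.pyGet? board x with
  | some row => PySem.List.pyGet? row y
  | none => none

-- board[x][y] = v; where Python would raise IndexError (outside Pre_) this
-- total form leaves the board unchanged (pySetD)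
def pvCellSet (board : List (List Int)) (x y v : Int) : List (List Int) :=
  PySem.List.pySetD board x (PySem.List.pySetD (PySem.List.pyGetD board x []) y v)

-- min(a for a,_ in l) / min(b for _,b in l): Python raises on an empty list;
-- `rotate`/`bfs` only ever take the min of a nonempty list, the default 0 is unreachable
def pvMin1 (l : List (Int × Int)) : Int :=
  (PySem.List.min? (l.map (fun p => p.1)) (fun v => v)).getD 0
def pvMin2 (l : List (Int × Int)) : Int :=
  (PySem.List.min? (l.map (fun p => p.2)) (fun v => v)).getD 0

-- the common tail of `rotate` and `bfs`: shift the mins to (0,0) and sort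
-- (Python's sorted on int pairs = sorted2 with first/second keys)
def pvNorm (l : List (Int × Int)) : List (Int × Int) :=
  PySem.List.sorted2 (l.map (fun p => (p.1 - pvMin1 l, p.2 - pvMin2 l)))
    (fun p => p.1) (fun p => p.2)

def pvRotate (spots : List (Int × Int)) : List (Int × Int) :=
  pvNorm (spots.map (fun p => (p.2, -p.1)))

-- number of board cells equal to target (termination measure of the BFS loops)
def pvCount (target : Int) (board : List (List Int)) : Nat :=
  (board.map (fun row => row.countP (fun v => v == target))).sum

-- one neighbour probe of the BFS inner `for nx, ny in [...]` loop;
-- state = (board, result, q).  Python's short-circuit `and` = the && chain;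
-- where Python would raise IndexError (outside Pre_) the probe is a no-op.
def pvVisit (n target : Int) (st : List (List Int) × List (Int × Int) × List (Int × Int))
    (nb : Int × Int) : List (List Int) × List (Int × Int) × List (Int × Int) :=
  if (decide (0 ≤ nb.1) && decide (nb.1 < n) && decide (0 ≤ nb.2) && decide (nb.2 < n)) &&
      (pvCellGet? st.1 nb.1 nb.2 == some target) then
    (pvCellSet st.1 nb.1 nb.2 (1 - target), st.2.1 ++ [nb], st.2.2 ++ [nb])
  else st

theorem pvCountP_set (l : List Int) (k : Nat) (v target : Int) (hk : k < l.length)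
    (hl : l[k] = target) (hv : v ≠ target) :
    (l.set k v).countP (fun x => x == target) + 1 = l.countP (fun x => x == target) := by
  induction l generalizing k with
  | nil => simp at hk
  | cons a l ih =>
    cases k with
    | zero =>
      simp at hl
      subst hl
      simp [hv]
    | succ k =>
      simp at hk hl
      simp [List.countP_cons]
      have := ih k hk hl
      omega

theorem pvSum_set (l : List Nat) (k : Nat) (a : Nat) (hk : k < l.length) :
    (l.set k a).sum + l[k] = l.sum + a := by
  induction l generalizing k with
  | nil => simp at hk
  | cons b l ih =>
    cases k with
    | zero => simp; omega
    | succ k =>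
      simp at hk
      have := ih k hk
      simp [List.set]
      omega

theorem pvCount_cellSet (board : List (List Int)) (x y target v : Int)
    (hx : 0 ≤ x) (hy : 0 ≤ y) (h : pvCellGet? board x y = some target) (hv : v ≠ target) :
    pvCount target (pvCellSet board x y v) + 1 = pvCount target board := by
  unfold pvCellGet? at h
  rw [PySem.List.pyGet?_of_nonneg _ hx] at h
  rcases hrow : board[x.toNat]? with _ | row
  · rw [hrow] at h; exact absurd h (by simp)
  rw [hrow] at h
  simp only at h
  rw [PySem.List.pyGet?_of_nonneg _ hy] at h
  have hxl : x.toNat < board.length := by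
    by_contra hc
    rw [List.getElem?_eq_none (by omega)] at hrow
    exact absurd hrow (by simp)
  have hyl : y.toNat < row.length := by
    by_contra hc
    rw [List.getElem?_eq_none (by omega)] at h
    exact absurd h (by simp)
  have hrow' : board[x.toNat] = row := by
    rw [List.getElem?_eq_getElem hxl] at hrow
    exact Option.some_injective _ hrow
  have hcell : row[y.toNat] = target := by
    rw [List.getElem?_eq_getElem hyl] at h
    exact Option.some_injective _ h
  unfold pvCellSet pvCount
  rw [PySem.List.pySetD_of_nonneg _ _ hx, PySem.List.pySetD_of_nonneg _ _ hy]
  have hgd : PySem.List.pyGetD board x [] = row := by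
    rw [PySem.List.pyGetD_eq_getElem _ _ hx (by omega), hrow']
  rw [hgd, List.map_set]
  have h1 := pvCountP_set row y.toNat v target hyl hcell hv
  have h2 := pvSum_set (board.map (fun row => row.countP (fun x => x == target)))
      x.toNat (((row.set y.toNat v)).countP (fun x => x == target))
      (by simpa using hxl)
  simp only [List.getElem_map, hrow'] at h2
  omega

theorem pvVisit_measure (n target : Int)
    (st : List (List Int) × List (Int × Int) × List (Int × Int)) (nb : Int × Int) :
    pvCount target (pvVisit n target st nb).1 + (pvVisit n target st nb).2.2.length ≤
      pvCount target st.1 + st.2.2.length ∧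
    st.2.2.length ≤ (pvVisit n target st nb).2.2.length := by
  unfold pvVisit
  split
  · next hguard =>
    simp only [Bool.and_eq_true, decide_eq_true_eq, beq_iff_eq] at hguard
    obtain ⟨⟨⟨⟨h1, _⟩, h2⟩, _⟩, hcell⟩ := hguard
    have := pvCount_cellSet st.1 nb.1 nb.2 target (1 - target) h1 h2 hcell (by omega)
    simp only [List.length_append, List.length_cons, List.length_nil]
    omega
  · omega

theorem pvFold_measure (n target : Int) (nbs : List (Int × Int))
    (st : List (List Int) × List (Int × Int) × List (Int × Int)) :
    pvCount target (nbs.foldl (pvVisit n target) st).1 +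
      (nbs.foldl (pvVisit n target) st).2.2.length ≤ pvCount target st.1 + st.2.2.length ∧
    st.2.2.length ≤ (nbs.foldl (pvVisit n target) st).2.2.length := by
  induction nbs generalizing st with
  | nil => simp
  | cons nb nbs ih =>
    simp only [List.foldl_cons]
    have h1 := pvVisit_measure n target st nb
    have h2 := ih (pvVisit n target st nb)
    exact ⟨by omega, by omega⟩

-- the `while q:` loop of bfs; state = (board, q, result)
def pvBfsLoop (n target : Int) (board : List (List Int))
    (q result : List (Int × Int)) : List (List Int) × List (Int × Int) :=
  match q with
  | [] => (board, result)
  | (x, y) :: q' =>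
    let st := [(x + 1, y), (x - 1, y), (x, y + 1), (x, y - 1)].foldl
      (pvVisit n target) (board, result, q')
    pvBfsLoop n target st.1 st.2.2 st.2.1
termination_by (pvCount target board, q.length)
decreasing_by
  have h := pvFold_measure n target [(x + 1, y), (x - 1, y), (x, y + 1), (x, y - 1)]
    (board, result, q')
  set F := List.foldl (pvVisit n target) (board, result, q')
    [(x + 1, y), (x - 1, y), (x, y + 1), (x, y - 1)]
  simp only at h
  rcases Nat.lt_or_ge (pvCount target F.1) (pvCount target board) with hlt | hge
  · exact Prod.Lex.left _ _ hlt
  · have he : pvCount target F.1 = pvCount target board := by omega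
    rw [he]
    apply Prod.Lex.right
    simp only [List.length_cons]
    omega

def pvBfs (board : List (List Int)) (n x y target : Int) :
    List (List Int) × List (Int × Int) :=
  let board1 := pvCellSet board x y (1 - target)
  let r := pvBfsLoop n target board1 [(x, y)] [(x, y)]
  (r.1, pvNorm r.2)

-- PORT of A's `solution`: the two collection double-loops inline, then the
-- greedy used-array matching with the 4-rotation inner scan (break = found flag)
def solution (game_board : List (List Int)) (table : List (List Int)) : Int :=
  let n : Int := PySem.List.len table
  let sres := (PySem.List.pyRange 0 n 1).foldl (fun st i =>
      (PySem.List.pyRange 0 n 1).foldl (fun st j =>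
        if pvCellGet? st.1 i j == some 0 then
          let r := pvBfs st.1 n i j 0
          (r.1, st.2 ++ [r.2])
        else st) st) (game_board, ([] : List (List (Int × Int))))
  let spaces := sres.2
  let pres := (PySem.List.pyRange 0 n 1).foldl (fun st i =>
      (PySem.List.pyRange 0 n 1).foldl (fun st j =>
        if pvCellGet? st.1 i j == some 1 then
          let r := pvBfs st.1 n i j 1
          (r.1, st.2 ++ [r.2])
        else st) st) (table, ([] : List (List (Int × Int))))
  let puzzles := pres.2
  let final := spaces.foldl (fun (st : Int × List Bool) space =>
      let inner := (PySem.List.pyRange 0 (PySem.List.len puzzles) 1).foldl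
        (fun (t : Int × List Bool × Bool) i =>
          if t.2.2 then t   -- `break` after a match: skip the rest of the scan
          else
            let puzzle := PySem.List.pyGetD puzzles i []
            if PySem.List.pyGetD t.2.1 i false ||
                !(PySem.List.len space == PySem.List.len puzzle) then t
            else
              -- `for dir in range(4): if temp == space: … break; temp = rotate(temp)`
              let hit := ((PySem.List.pyRange 0 4 1).foldl
                (fun (d : List (Int × Int) × Bool) _ =>
                  if d.2 then d
                  else if d.1 == space then (d.1, true)
                  else (pvRotate d.1, false)) (puzzle, false)).2
              if hit then
                (t.1 + PySem.List.len puzzle, PySem.List.pySetD t.2.1 i true, true)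
              else t)
        (st.1, st.2, false)
      (inner.1, inner.2.1))
    (0, List.replicate puzzles.length false)
  final.1

-- ===== PORT B =====

-- Source B reads and writes cells through its own accessors
def pvPeek (board : List (List Int)) (r c : Int) : Option Int :=
  (PySem.List.pyGet? board r).bind (fun row => PySem.List.pyGet? row c)

def pvPoke (board : List (List Int)) (r c v : Int) : List (List Int) :=
  let row := PySem.List.pyGetD board r []
  PySem.List.pySetD board r (PySem.List.pySetD row c v)

-- Source B `normalize`: min over a projection, then shift and sort
def pvLo (f : Int × Int → Int) (cells : List (Int × Int)) : Int :=
  (PySem.List.min? (cells.map f) (fun v => v)).getD 0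

def pvNormB (cells : List (Int × Int)) : List (Int × Int) :=
  let mr := pvLo Prod.fst cells
  let mc := pvLo Prod.snd cells
  PySem.List.sorted2 (cells.map (fun p => (p.1 - mr, p.2 - mc))) Prod.fst Prod.snd

-- Source B `rot90`
def pvRotB (cells : List (Int × Int)) : List (Int × Int) :=
  pvNormB (cells.map (fun p => (p.2, -p.1)))

-- Source B's inner `for nr, nc in (...)` probe loop for one frontier cell
def pvProbeB (n target : Int) (st : List (List Int) × List (Int × Int) × List (Int × Int))
    (nb : Int × Int) : List (List Int) × List (Int × Int) × List (Int × Int) :=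
  if (0 ≤ nb.1 ∧ nb.1 < n ∧ 0 ≤ nb.2 ∧ nb.2 < n) ∧ pvPeek st.1 nb.1 nb.2 = some target then
    (pvPoke st.1 nb.1 nb.2 (1 - target), st.2.1 ++ [nb], st.2.2 ++ [nb])
  else st

-- needed before the frontier loop: Source B's probe = A's probe (different text, same step)
theorem pvProbeB_eq : pvProbeB = pvVisit := by
  funext n target st nb
  have hpk : pvPeek st.1 nb.1 nb.2 = pvCellGet? st.1 nb.1 nb.2 := by
    unfold pvPeek pvCellGet?
    cases PySem.List.pyGet? st.1 nb.1 <;> rfl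
  have hpo : pvPoke st.1 nb.1 nb.2 (1 - target) = pvCellSet st.1 nb.1 nb.2 (1 - target) := rfl
  unfold pvProbeB pvVisit
  by_cases h : (0 ≤ nb.1 ∧ nb.1 < n ∧ 0 ≤ nb.2 ∧ nb.2 < n) ∧
      pvCellGet? st.1 nb.1 nb.2 = some target
  · rw [if_pos (by rw [hpk]; exact h), if_pos (by
      simp only [Bool.and_eq_true, decide_eq_true_eq, beq_iff_eq]
      exact ⟨⟨⟨⟨h.1.1, h.1.2.1⟩, h.1.2.2.1⟩, h.1.2.2.2⟩, h.2⟩), hpo]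
  · rw [if_neg (by rw [hpk]; exact h), if_neg (by
      simp only [Bool.and_eq_true, decide_eq_true_eq, beq_iff_eq]
      intro hb
      exact h ⟨⟨hb.1.1.1.1, hb.1.1.1.2, hb.1.1.2, hb.1.2⟩, hb.2⟩)]

-- one frontier cell of Source B's level loop; state = (board, cells, nxt)
def pvCellStepB (n target : Int)
    (st : List (List Int) × List (Int × Int) × List (Int × Int)) (c : Int × Int) :
    List (List Int) × List (Int × Int) × List (Int × Int) :=
  [(c.1 + 1, c.2), (c.1 - 1, c.2), (c.1, c.2 + 1), (c.1, c.2 - 1)].foldl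
    (pvProbeB n target) st

-- termination of the level loop (cited by name from pvFillGo's decreasing_by)
theorem pvStepB_flat (n target : Int) (frontier : List (Int × Int))
    (st : List (List Int) × List (Int × Int) × List (Int × Int)) :
    frontier.foldl (pvCellStepB n target) st
      = (frontier.flatMap (fun c => [(c.1 + 1, c.2), (c.1 - 1, c.2), (c.1, c.2 + 1), (c.1, c.2 - 1)])).foldl
          (pvVisit n target) st := by
  induction frontier generalizing st with
  | nil => rfl
  | cons c fs ih =>
    rw [List.foldl_cons, ih, List.flatMap_cons, List.foldl_append]
    congr 1
    unfold pvCellStepB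
    simp only [pvProbeB_eq]

theorem pvFillGo_dec (n target : Int) (f : Int × Int) (fs : List (Int × Int))
    (board : List (List Int)) (cells : List (Int × Int)) :
    pvCount target ((f :: fs).foldl (pvCellStepB n target) (board, cells, ([] : List (Int × Int)))).1
      + ((f :: fs).foldl (pvCellStepB n target) (board, cells, ([] : List (Int × Int)))).2.2.length
      < pvCount target board + (f :: fs).length := by
  rw [pvStepB_flat]
  have h := pvFold_measure n target
    ((f :: fs).flatMap (fun c => [(c.1 + 1, c.2), (c.1 - 1, c.2), (c.1, c.2 + 1), (c.1, c.2 - 1)]))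
    (board, cells, ([] : List (Int × Int)))
  simp only [List.length_nil, List.length_cons] at h ⊢
  omega

-- Source B's `while frontier:` loop: process the whole frontier, recurse on the next level
def pvFillGo (n target : Int) (board : List (List Int)) (cells frontier : List (Int × Int)) :
    List (List Int) × List (Int × Int) :=
  match frontier with
  | [] => (board, cells)
  | f :: fs =>
    let st := (f :: fs).foldl (pvCellStepB n target) (board, cells, ([] : List (Int × Int)))
    pvFillGo n target st.1 st.2.1 st.2.2
termination_by pvCount target board + frontier.length
decreasing_by exact pvFillGo_dec n target f fs board cells

-- Source B `fill`
def pvFill (board : List (List Int)) (n sr sc target : Int) :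
    List (List Int) × List (Int × Int) :=
  let mark := 1 - target
  let board1 := pvPoke board sr sc mark
  let r := pvFillGo n target board1 [(sr, sc)] [(sr, sc)]
  (r.1, pvNormB r.2)

-- Source B `shapes`
def pvPiecesB (board : List (List Int)) (n target : Int) :
    List (List Int) × List (List (Int × Int)) :=
  (PySem.List.pyRange 0 n 1).foldl (fun st i =>
      (PySem.List.pyRange 0 n 1).foldl (fun st j =>
        if pvPeek st.1 i j == some target then
          let r := pvFill st.1 n i j target
          (r.1, st.2 ++ [r.2])
        else st) st) (board, ([] : List (List (Int × Int))))

-- Source B's `canonical`: rots = [shape; 3 × rot90(rots[-1])]; min(rots)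
-- (Python's list/tuple comparison = the lexicographic order on List (Lex (Int × Int)))
def pvCanon (shape : List (Int × Int)) : List (Int × Int) :=
  let rots := (PySem.List.pyRange 0 3 1).foldl
    (fun rots _ => rots ++ [pvRotB (PySem.List.pyGetD rots (-1) [])]) [shape]
  (PySem.List.min? rots (fun l => l.map (fun p => (toLex p : Lex (Int × Int))))).getD []

-- Counter(tuple(canonical(s)) …): the tuple() conversion is the identity here
def solution_alt (game_board : List (List Int)) (table : List (List Int)) : Int :=
  let n : Int := PySem.List.len table
  let sc := PySem.Dict.counter (((pvPiecesB game_board n 0).2).map (fun s => pvCanon s))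
  let pc := PySem.Dict.counter (((pvPiecesB table n 1).2).map (fun p => pvCanon p))
  (sc.items.map (fun kv => min kv.2 (pc.getD kv.1 0) * PySem.List.len kv.1)).sum

-- ===== PRECONDITION & SPEC =====
-- A indexes both grids at all (i, j) with i, j < len(table) and raises
-- IndexError when a needed row or cell is missing; Pre_ is exactly the inputs
-- where every such access exists (extra rows/cells beyond len(table) are allowed
-- and ignored, as in A).
def Pre_solution (game_board : List (List Int)) (table : List (List Int)) : Prop :=
  table.length ≤ game_board.length ∧
  (∀ row ∈ game_board.take table.length, table.length ≤ row.length) ∧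
  (∀ row ∈ table, table.length ≤ row.length)
instance (game_board : List (List Int)) (table : List (List Int)) :
    Decidable (Pre_solution game_board table) := by unfold Pre_solution; infer_instance

def pvWitness_solution : List (List Int) × List (List Int) :=
  ([[0, 1], [1, 1]], [[1, 0], [0, 0]])

def Spec_solution (game_board : List (List Int)) (table : List (List Int)) (out : Int) : Prop := out = solution_alt game_board table
instance (game_board : List (List Int)) (table : List (List Int)) (out : Int) : Decidable (Spec_solution game_board table out) := by unfold Spec_solution; infer_instance

-- ===== CLAIM (what is proved, stated in full; the proofs are below) =====
def Claim_equal_solution : Prop := ∀ (game_board : List (List Int)) (table : List (List Int)), Dom_solution game_board table → Pre_solution game_board table → Spec_solution game_board table (solution game_board table)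

-- ===== LEMMAS AND PROOFS =====

-- ---------- bridges: Source B's helpers compute A's helpers' values ----------

theorem pvPeek_eq : pvPeek = pvCellGet? := by
  funext board r c
  unfold pvPeek pvCellGet?
  cases PySem.List.pyGet? board r <;> rfl

theorem pvRotB_eq : pvRotB = pvRotate := rfl

-- ---------- simulation: the level loop visits the queue in A's order ----------

theorem pvVisit_prefix (n target : Int) (b : List (List Int)) (r pre q : List (Int × Int))
    (c : Int × Int) :
    pvVisit n target (b, r, pre ++ q) c
      = ((pvVisit n target (b, r, q) c).1, (pvVisit n target (b, r, q) c).2.1,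
          pre ++ (pvVisit n target (b, r, q) c).2.2) := by
  unfold pvVisit
  by_cases h : ((decide (0 ≤ c.1) && decide (c.1 < n) && decide (0 ≤ c.2) && decide (c.2 < n)) &&
      (pvCellGet? b c.1 c.2 == some target)) = true
  · simp only [h, if_true, List.append_assoc]
  · simp [h]

theorem pvFold_prefix (n target : Int) (nbs : List (Int × Int)) :
    ∀ (b : List (List Int)) (r pre q : List (Int × Int)),
    nbs.foldl (pvVisit n target) (b, r, pre ++ q)
      = ((nbs.foldl (pvVisit n target) (b, r, q)).1,
         (nbs.foldl (pvVisit n target) (b, r, q)).2.1,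
         pre ++ (nbs.foldl (pvVisit n target) (b, r, q)).2.2) := by
  induction nbs with
  | nil => intro b r pre q; rfl
  | cons c nbs ih =>
    intro b r pre q
    rw [List.foldl_cons, List.foldl_cons, pvVisit_prefix]
    exact ih (pvVisit n target (b, r, q) c).1 (pvVisit n target (b, r, q) c).2.1 pre
      (pvVisit n target (b, r, q) c).2.2

theorem pvSim (n target : Int) (cur : List (Int × Int)) :
    ∀ (board : List (List Int)) (cells nxt : List (Int × Int)),
    pvBfsLoop n target board (cur ++ nxt) cells
      = pvBfsLoop n target (cur.foldl (pvCellStepB n target) (board, cells, nxt)).1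
          (cur.foldl (pvCellStepB n target) (board, cells, nxt)).2.2
          (cur.foldl (pvCellStepB n target) (board, cells, nxt)).2.1 := by
  induction cur with
  | nil => intro board cells nxt; rfl
  | cons c cur ih =>
    intro board cells nxt
    obtain ⟨x, y⟩ := c
    rw [List.cons_append, pvBfsLoop]
    rw [pvFold_prefix n target [(x + 1, y), (x - 1, y), (x, y + 1), (x, y - 1)] board cells cur nxt]
    rw [ih ([(x + 1, y), (x - 1, y), (x, y + 1), (x, y - 1)].foldl (pvVisit n target)
        (board, cells, nxt)).1
      ([(x + 1, y), (x - 1, y), (x, y + 1), (x, y - 1)].foldl (pvVisit n target)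
        (board, cells, nxt)).2.1
      ([(x + 1, y), (x - 1, y), (x, y + 1), (x, y - 1)].foldl (pvVisit n target)
        (board, cells, nxt)).2.2]
    have hinit : (([(x + 1, y), (x - 1, y), (x, y + 1), (x, y - 1)].foldl (pvVisit n target)
            (board, cells, nxt)).1,
          ([(x + 1, y), (x - 1, y), (x, y + 1), (x, y - 1)].foldl (pvVisit n target)
            (board, cells, nxt)).2.1,
          ([(x + 1, y), (x - 1, y), (x, y + 1), (x, y - 1)].foldl (pvVisit n target)
            (board, cells, nxt)).2.2)
        = pvCellStepB n target (board, cells, nxt) (x, y) := by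
      unfold pvCellStepB
      simp only [pvProbeB_eq]
    rw [hinit, ← List.foldl_cons]

theorem pvFillGo_eq (n target : Int) (board : List (List Int))
    (cells frontier : List (Int × Int)) :
    pvFillGo n target board cells frontier = pvBfsLoop n target board frontier cells := by
  induction board, cells, frontier using pvFillGo.induct n target with
  | case1 board cells =>
    rw [pvFillGo, pvBfsLoop]
  | case2 board cells f fs st ih =>
    rw [pvFillGo]
    have hs := pvSim n target (f :: fs) board cells []
    rw [List.append_nil] at hs
    rw [hs]
    exact ih

theorem pvFill_eq : pvFill = pvBfs := by
  funext board n sr sc target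
  show (let r := pvFillGo n target (pvPoke board sr sc (1 - target)) [(sr, sc)] [(sr, sc)]
        (r.1, pvNormB r.2))
    = pvBfs board n sr sc target
  rw [pvFillGo_eq]
  rfl

-- the generic extraction fold (the inlined double loops of A's port), for the proofs
def pvPieces (board : List (List Int)) (n target : Int) :
    List (List Int) × List (List (Int × Int)) :=
  (PySem.List.pyRange 0 n 1).foldl (fun st i =>
      (PySem.List.pyRange 0 n 1).foldl (fun st j =>
        if pvCellGet? st.1 i j == some target then
          let r := pvBfs st.1 n i j target
          (r.1, st.2 ++ [r.2])
        else st) st) (board, ([] : List (List (Int × Int))))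

theorem pvPiecesB_eq : pvPiecesB = pvPieces := by
  funext board n target
  unfold pvPiecesB pvPieces
  simp only [pvPeek_eq, pvFill_eq]

-- ---------- order bridge: Python pair-sort = sort by the lexicographic key ----------

theorem pvSorted2_eq (xs : List (Int × Int)) :
    PySem.List.sorted2 xs (fun p => p.1) (fun p => p.2) false
      = PySem.List.sorted xs (fun p => (toLex p : Lex (Int × Int))) false := by
  simp only [PySem.List.sorted2, PySem.List.sorted]
  congr 1
  funext acc x
  congr 1
  funext a b
  by_cases h1 : a.1 < b.1 <;> by_cases h2 : b.1 < a.1 <;> by_cases h3 : a.2 < b.2 <;>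
    simp [h1, h2, h3, Prod.Lex.lt_iff] <;> omega

theorem pvLexInj : Function.Injective (fun p : Int × Int => (toLex p : Lex (Int × Int))) :=
  fun _ _ h => h

-- ---------- mins ----------

theorem pvMin1_attained (l : List (Int × Int)) (hl : l ≠ []) : ∃ p ∈ l, p.1 = pvMin1 l := by
  unfold pvMin1
  rcases hm : PySem.List.min? (l.map (fun p => p.1)) (fun v => v) with _ | m
  · rw [PySem.List.min?_eq_none_iff] at hm
    simp at hm
    exact absurd hm hl
  · have hmem := PySem.List.min?_mem hm
    simp only [List.mem_map] at hmem
    obtain ⟨p, hp, he⟩ := hmem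
    exact ⟨p, hp, by rw [hm]; simpa using he⟩

theorem pvMin1_le (l : List (Int × Int)) (hl : l ≠ []) : ∀ p ∈ l, pvMin1 l ≤ p.1 := by
  intro p hp
  unfold pvMin1
  rcases hm : PySem.List.min? (l.map (fun p => p.1)) (fun v => v) with _ | m
  · rw [PySem.List.min?_eq_none_iff] at hm
    simp at hm
    exact absurd hm hl
  · have := PySem.List.min?_isMin hm p.1 (List.mem_map.mpr ⟨p, hp, rfl⟩)
    rw [hm]
    simpa using this

theorem pvMin2_attained (l : List (Int × Int)) (hl : l ≠ []) : ∃ p ∈ l, p.2 = pvMin2 l := by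
  unfold pvMin2
  rcases hm : PySem.List.min? (l.map (fun p => p.2)) (fun v => v) with _ | m
  · rw [PySem.List.min?_eq_none_iff] at hm
    simp at hm
    exact absurd hm hl
  · have hmem := PySem.List.min?_mem hm
    simp only [List.mem_map] at hmem
    obtain ⟨p, hp, he⟩ := hmem
    exact ⟨p, hp, by rw [hm]; simpa using he⟩

theorem pvMin2_le (l : List (Int × Int)) (hl : l ≠ []) : ∀ p ∈ l, pvMin2 l ≤ p.2 := by
  intro p hp
  unfold pvMin2
  rcases hm : PySem.List.min? (l.map (fun p => p.2)) (fun v => v) with _ | m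
  · rw [PySem.List.min?_eq_none_iff] at hm
    simp at hm
    exact absurd hm hl
  · have := PySem.List.min?_isMin hm p.2 (List.mem_map.mpr ⟨p, hp, rfl⟩)
    rw [hm]
    simpa using this

theorem pvMin1_unique (l : List (Int × Int)) (v : Int)
    (hmem : ∃ p ∈ l, p.1 = v) (hlb : ∀ p ∈ l, v ≤ p.1) : pvMin1 l = v := by
  obtain ⟨p0, hp0, he⟩ := hmem
  have hl : l ≠ [] := List.ne_nil_of_mem hp0
  have h1 := pvMin1_le l hl p0 hp0
  obtain ⟨q, hq, hqe⟩ := pvMin1_attained l hl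
  have h2 := hlb q hq
  omega

theorem pvMin2_unique (l : List (Int × Int)) (v : Int)
    (hmem : ∃ p ∈ l, p.2 = v) (hlb : ∀ p ∈ l, v ≤ p.2) : pvMin2 l = v := by
  obtain ⟨p0, hp0, he⟩ := hmem
  have hl : l ≠ [] := List.ne_nil_of_mem hp0
  have h1 := pvMin2_le l hl p0 hp0
  obtain ⟨q, hq, hqe⟩ := pvMin2_attained l hl
  have h2 := hlb q hq
  omega

theorem pvMin1_congr (l l' : List (Int × Int)) (h : l.Perm l') : pvMin1 l = pvMin1 l' := by
  by_cases hl : l = []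
  · subst hl
    rw [List.nil_perm] at h
    rw [h]
  · symm
    apply pvMin1_unique
    · obtain ⟨p, hp, he⟩ := pvMin1_attained l hl
      exact ⟨p, h.mem_iff.mp hp, he⟩
    · intro p hp
      exact pvMin1_le l hl p (h.mem_iff.mpr hp)

theorem pvMin2_congr (l l' : List (Int × Int)) (h : l.Perm l') : pvMin2 l = pvMin2 l' := by
  by_cases hl : l = []
  · subst hl
    rw [List.nil_perm] at h
    rw [h]
  · symm
    apply pvMin2_unique
    · obtain ⟨p, hp, he⟩ := pvMin2_attained l hl
      exact ⟨p, h.mem_iff.mp hp, he⟩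
    · intro p hp
      exact pvMin2_le l hl p (h.mem_iff.mpr hp)

-- ---------- pvNorm ----------

theorem pvNorm_perm (l : List (Int × Int)) :
    (pvNorm l).Perm (l.map (fun p => (p.1 - pvMin1 l, p.2 - pvMin2 l))) := by
  unfold pvNorm; exact PySem.List.sorted2_perm _ _ _ _

theorem pvNorm_congr (l l' : List (Int × Int)) (h : l.Perm l') : pvNorm l = pvNorm l' := by
  unfold pvNorm
  rw [pvSorted2_eq, pvSorted2_eq, pvMin1_congr l l' h, pvMin2_congr l l' h]
  exact PySem.List.sorted_eq_sorted_of_perm _ _ _ pvLexInj (h.map _)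

theorem pvNorm_translate (l : List (Int × Int)) (hl : l ≠ []) (t1 t2 : Int) :
    pvNorm (l.map (fun p => (p.1 + t1, p.2 + t2))) = pvNorm l := by
  have hm1 : pvMin1 (l.map (fun p => (p.1 + t1, p.2 + t2))) = pvMin1 l + t1 := by
    apply pvMin1_unique
    · obtain ⟨p, hp, he⟩ := pvMin1_attained l hl
      exact ⟨_, List.mem_map.mpr ⟨p, hp, rfl⟩, by simp [he]⟩
    · intro q hq
      obtain ⟨p, hp, rfl⟩ := List.mem_map.mp hq
      have := pvMin1_le l hl p hp
      simp
      omega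
  have hm2 : pvMin2 (l.map (fun p => (p.1 + t1, p.2 + t2))) = pvMin2 l + t2 := by
    apply pvMin2_unique
    · obtain ⟨p, hp, he⟩ := pvMin2_attained l hl
      exact ⟨_, List.mem_map.mpr ⟨p, hp, rfl⟩, by simp [he]⟩
    · intro q hq
      obtain ⟨p, hp, rfl⟩ := List.mem_map.mp hq
      have := pvMin2_le l hl p hp
      simp
      omega
  unfold pvNorm
  rw [hm1, hm2, List.map_map]
  have hmaps : l.map ((fun p : Int × Int => (p.1 - (pvMin1 l + t1), p.2 - (pvMin2 l + t2))) ∘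
      (fun p => (p.1 + t1, p.2 + t2))) = l.map (fun p => (p.1 - pvMin1 l, p.2 - pvMin2 l)) := by
    apply List.map_congr_left
    intro p _
    simp [Prod.ext_iff] <;> omega
  rw [hmaps]

def pvN (s : List (Int × Int)) : Prop :=
  s ≠ [] ∧ s.Pairwise (fun a b => (toLex a : Lex (Int × Int)) < toLex b) ∧
    pvMin1 s = 0 ∧ pvMin2 s = 0

theorem pvN_nodup {s : List (Int × Int)} (h : pvN s) : s.Nodup := by
  obtain ⟨-, hpw, -, -⟩ := h
  exact List.Pairwise.imp (fun hlt => by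
    intro he
    subst he
    exact lt_irrefl _ hlt) hpw

theorem pvNorm_N (l : List (Int × Int)) (hl : l ≠ []) (hnd : l.Nodup) : pvN (pvNorm l) := by
  have hperm := pvNorm_perm l
  have hinj : Function.Injective (fun p : Int × Int => ((p.1 - pvMin1 l, p.2 - pvMin2 l) : Int × Int)) := by
    intro a b he
    simp [Prod.ext_iff] at he ⊢
    omega
  have hndm : (l.map (fun p => (p.1 - pvMin1 l, p.2 - pvMin2 l))).Nodup := hnd.map hinj
  have hndn : (pvNorm l).Nodup := hperm.symm.nodup hndm
  have hsort : pvNorm l = PySem.List.sorted (l.map (fun p => (p.1 - pvMin1 l, p.2 - pvMin2 l)))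
      (fun p => (toLex p : Lex (Int × Int))) false := by
    unfold pvNorm
    rw [pvSorted2_eq]
  refine ⟨?_, ?_, ?_, ?_⟩
  · intro he
    have hlen := hperm.length_eq
    rw [he] at hlen
    simp at hlen
    apply hl
    cases l with
    | nil => rfl
    | cons a t => simp at hlen
  · have hle := PySem.List.sorted_pairwise (l.map (fun p => (p.1 - pvMin1 l, p.2 - pvMin2 l)))
      (fun p => (toLex p : Lex (Int × Int)))
    rw [← hsort] at hle
    exact List.Pairwise.imp (fun hab => lt_of_le_of_ne hab.1 (fun he => hab.2 (pvLexInj he)))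
      (hle.and hndn)
  · apply pvMin1_unique
    · obtain ⟨p, hp, he⟩ := pvMin1_attained l hl
      refine ⟨(p.1 - pvMin1 l, p.2 - pvMin2 l), ?_, by simp [he]⟩
      exact hperm.symm.subset (List.mem_map.mpr ⟨p, hp, rfl⟩)
    · intro q hq
      obtain ⟨p, hp, rfl⟩ := List.mem_map.mp (hperm.subset hq)
      have := pvMin1_le l hl p hp
      simp
      omega
  · apply pvMin2_unique
    · obtain ⟨p, hp, he⟩ := pvMin2_attained l hl
      refine ⟨(p.1 - pvMin1 l, p.2 - pvMin2 l), ?_, by simp [he]⟩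
      exact hperm.symm.subset (List.mem_map.mpr ⟨p, hp, rfl⟩)
    · intro q hq
      obtain ⟨p, hp, rfl⟩ := List.mem_map.mp (hperm.subset hq)
      have := pvMin2_le l hl p hp
      simp
      omega

theorem pvNorm_id {s : List (Int × Int)} (h : pvN s) : pvNorm s = s := by
  obtain ⟨hne, hpw, hm1, hm2⟩ := h
  unfold pvNorm
  rw [hm1, hm2]
  rw [show s.map (fun p => (p.1 - 0, p.2 - 0)) = s by simp]
  rw [pvSorted2_eq]
  exact PySem.List.sorted_eq_self_of_pairwise _ _ (hpw.imp le_of_lt)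

theorem pvNorm_rot_pvNorm (l : List (Int × Int)) (hl : l ≠ []) :
    pvNorm ((pvNorm l).map (fun p => (p.2, -p.1))) = pvNorm (l.map (fun p => (p.2, -p.1))) := by
  have hperm := (pvNorm_perm l).map (fun p : Int × Int => (p.2, -p.1))
  rw [pvNorm_congr _ _ hperm, List.map_map]
  have hcomp : l.map ((fun p : Int × Int => (p.2, -p.1)) ∘
      (fun p => (p.1 - pvMin1 l, p.2 - pvMin2 l)))
      = (l.map (fun p => (p.2, -p.1))).map (fun q => (q.1 + -pvMin2 l, q.2 + pvMin1 l)) := by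
    rw [List.map_map]
    apply List.map_congr_left
    intro p _
    simp [Prod.ext_iff] <;> omega
  rw [hcomp, pvNorm_translate _ (by simpa using hl) (-pvMin2 l) (pvMin1 l)]

theorem pvN_rotate {s : List (Int × Int)} (h : pvN s) : pvN (pvRotate s) := by
  have hnd := pvN_nodup h
  show pvN (pvNorm (s.map (fun p => (p.2, -p.1))))
  apply pvNorm_N
  · simpa using h.1
  · apply hnd.map
    intro a b he
    simp [Prod.ext_iff] at he ⊢
    omega

theorem pvRot4 {s : List (Int × Int)} (h : pvN s) :
    pvRotate (pvRotate (pvRotate (pvRotate s))) = s := by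
  have hne := h.1
  have h1 : pvRotate s = pvNorm (s.map (fun p => (p.2, -p.1))) := rfl
  have h2 : pvRotate (pvRotate s)
      = pvNorm ((s.map (fun p => (p.2, -p.1))).map (fun p => (p.2, -p.1))) := by
    rw [h1]
    exact pvNorm_rot_pvNorm _ (by simpa using hne)
  have h3 : pvRotate (pvRotate (pvRotate s))
      = pvNorm (((s.map (fun p => (p.2, -p.1))).map (fun p => (p.2, -p.1))).map
          (fun p => (p.2, -p.1))) := by
    rw [h2]
    exact pvNorm_rot_pvNorm _ (by simpa using hne)
  have h4 : pvRotate (pvRotate (pvRotate (pvRotate s)))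
      = pvNorm ((((s.map (fun p => (p.2, -p.1))).map (fun p => (p.2, -p.1))).map
          (fun p => (p.2, -p.1))).map (fun p => (p.2, -p.1))) := by
    rw [h3]
    exact pvNorm_rot_pvNorm _ (by simpa using hne)
  rw [h4]
  have hid : (((s.map (fun p : Int × Int => (p.2, -p.1))).map (fun p => (p.2, -p.1))).map
      (fun p => (p.2, -p.1))).map (fun p => (p.2, -p.1)) = s := by
    simp only [List.map_map]
    have : ((fun p : Int × Int => (p.2, -p.1)) ∘ (fun p : Int × Int => (p.2, -p.1)) ∘
        (fun p : Int × Int => (p.2, -p.1)) ∘ (fun p : Int × Int => (p.2, -p.1))) = id := by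
      funext p
      simp [Function.comp]
    rw [this, List.map_id]
  rw [hid, pvNorm_id h]

theorem pvRotate_length (s : List (Int × Int)) : (pvRotate s).length = s.length := by
  have := (pvNorm_perm (s.map (fun p => (p.2, -p.1)))).length_eq
  simpa using this

-- ---------- canonical form ----------

def pvRotIter : Nat → List (Int × Int) → List (Int × Int)
  | 0, s => s
  | k + 1, s => pvRotIter k (pvRotate s)

def pvRots4 (s : List (Int × Int)) : List (List (Int × Int)) :=
  [s, pvRotate s, pvRotate (pvRotate s), pvRotate (pvRotate (pvRotate s))]

def pvKey (l : List (Int × Int)) : List (Lex (Int × Int)) :=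
  l.map (fun p => (toLex p : Lex (Int × Int)))

theorem pvLt_bridge (a b : List (Lex (Int × Int))) :
    (@LT.lt _ List.instLT a b) ↔ (@LT.lt _ List.instLinearOrder.toLT a b) := by
  have h1 : (@LT.lt _ List.instLT a b) ↔ List.Lex (fun x1 x2 => x1 < x2) a b :=
    List.lt_iff_lex_lt a b
  have h2 : (@LT.lt _ List.instLinearOrder.toLT a b) ↔
      List.Lex (fun x1 x2 => x1 < x2) a b := Iff.rfl
  exact h1.trans h2.symm

theorem pvMin?_inst (xs : List (List (Int × Int))) :
    @PySem.List.min? (List (Int × Int)) (List (Lex (Int × Int))) List.instLT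
      (fun a b => a.decidableLT b) xs pvKey
    = @PySem.List.min? (List (Int × Int)) (List (Lex (Int × Int)))
      List.instLinearOrder.toLT LinearOrder.toDecidableLT xs pvKey := by
  unfold PySem.List.min?
  congr 1
  funext acc x
  cases acc with
  | none => rfl
  | some m =>
    simp only
    by_cases hlt : @LT.lt _ List.instLT (pvKey x) (pvKey m)
    · rw [if_pos hlt, if_pos ((pvLt_bridge _ _).mp hlt)]
    · rw [if_neg hlt, if_neg (fun hc => hlt ((pvLt_bridge _ _).mpr hc))]

theorem pvKey_inj : Function.Injective pvKey := by
  exact List.map_injective_iff.mpr pvLexInj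

theorem pvCanon_eq_min (s : List (Int × Int)) :
    pvCanon s = (PySem.List.min? (pvRots4 s) pvKey).getD [] := by
  unfold pvCanon
  simp only [pvRotB_eq]
  rw [show PySem.List.pyRange 0 3 1 = [0, 1, 2] from by decide]
  simp only [List.foldl]
  rw [show PySem.List.pyGetD [s] (-1) ([] : List (Int × Int)) = s from by
    simpa using PySem.List.pyGetD_neg_one_append_singleton ([] : List (List (Int × Int))) s []]
  rw [PySem.List.pyGetD_neg_one_append_singleton [s] (pvRotate s) []]
  rw [PySem.List.pyGetD_neg_one_append_singleton ([s] ++ [pvRotate s]) (pvRotate (pvRotate s)) []]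
  simp only [List.append_assoc, List.singleton_append, List.cons_append, List.nil_append]
  rfl

theorem pvCanon_mem (s : List (Int × Int)) : pvCanon s ∈ pvRots4 s := by
  rw [pvCanon_eq_min]
  rcases hm : PySem.List.min? (pvRots4 s) pvKey with _ | m
  · rw [PySem.List.min?_eq_none_iff] at hm
    simp [pvRots4] at hm
  · simpa using PySem.List.min?_mem hm

theorem pvCanon_min (s : List (Int × Int)) :
    ∀ y ∈ pvRots4 s, pvKey (pvCanon s) ≤ pvKey y := by
  rw [pvCanon_eq_min]
  rcases hm : PySem.List.min? (pvRots4 s) pvKey with _ | m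
  · rw [PySem.List.min?_eq_none_iff] at hm
    simp [pvRots4] at hm
  · intro y hy
    simp only [Option.getD_some]
    have hm' : @PySem.List.min? (List (Int × Int)) (List (Lex (Int × Int)))
        List.instLinearOrder.toLT LinearOrder.toDecidableLT (pvRots4 s) pvKey = some m :=
      (pvMin?_inst (pvRots4 s)).symm.trans hm
    exact PySem.List.min?_isMin hm' y hy

theorem pvCanon_congr_perm (s t : List (Int × Int)) (h : (pvRots4 s).Perm (pvRots4 t)) :
    pvCanon s = pvCanon t := by
  have hst : pvKey (pvCanon s) ≤ pvKey (pvCanon t) :=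
    pvCanon_min s (pvCanon t) (h.mem_iff.mpr (pvCanon_mem t))
  have hts : pvKey (pvCanon t) ≤ pvKey (pvCanon s) :=
    pvCanon_min t (pvCanon s) (h.mem_iff.mp (pvCanon_mem s))
  exact pvKey_inj (le_antisymm hst hts)

theorem pvRotIter_add (a b : Nat) (s : List (Int × Int)) :
    pvRotIter a (pvRotIter b s) = pvRotIter (a + b) s := by
  induction b generalizing s with
  | zero => rfl
  | succ b ih =>
    show pvRotIter a (pvRotIter b (pvRotate s)) = pvRotIter (a + (b + 1)) s
    rw [ih]
    rfl

theorem pvRotIter_four {s : List (Int × Int)} (h : pvN s) : pvRotIter 4 s = s := by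
  exact pvRot4 h

theorem pvRots4_eq (s : List (Int × Int)) :
    pvRots4 s = [pvRotIter 0 s, pvRotIter 1 s, pvRotIter 2 s, pvRotIter 3 s] := by
  rfl

theorem pvCanon_rotate {s : List (Int × Int)} (h : pvN s) :
    pvCanon (pvRotate s) = pvCanon s := by
  apply pvCanon_congr_perm
  show ([pvRotate s, pvRotate (pvRotate s), pvRotate (pvRotate (pvRotate s)),
    pvRotate (pvRotate (pvRotate (pvRotate s)))]).Perm _
  rw [pvRot4 h]
  have := List.perm_append_comm (l₁ := [pvRotate s, pvRotate (pvRotate s),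
    pvRotate (pvRotate (pvRotate s))]) (l₂ := [s])
  simpa [pvRots4] using this

theorem pvCanon_rotIter (k : Nat) {s : List (Int × Int)} (h : pvN s) :
    pvCanon (pvRotIter k s) = pvCanon s := by
  induction k generalizing s with
  | zero => rfl
  | succ k ih =>
    show pvCanon (pvRotIter k (pvRotate s)) = pvCanon s
    rw [ih (pvN_rotate h), pvCanon_rotate h]

theorem pvRotIter_mod (m : Nat) {s : List (Int × Int)} (h : pvN s) :
    pvRotIter m s = pvRotIter (m % 4) s := by
  induction m using Nat.strong_induction_on with
  | _ m ih =>
    by_cases hm : m < 4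
    · rw [Nat.mod_eq_of_lt hm]
    · have h4 : 4 ≤ m := by omega
      have e1 : pvRotIter m s = pvRotIter (m - 4) s := by
        conv_lhs => rw [show m = (m - 4) + 4 by omega]
        rw [← pvRotIter_add (m - 4) 4, pvRotIter_four h]
      rw [e1, ih (m - 4) (by omega), show m % 4 = (m - 4) % 4 from Nat.mod_eq_sub_mod h4]

theorem pvCanon_eq_iff {p s : List (Int × Int)} (hp : pvN p) (hs : pvN s) :
    pvCanon p = pvCanon s ↔ ∃ k < 4, pvRotIter k p = s := by
  constructor
  · intro he
    have hm := pvCanon_mem p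
    have hm' := pvCanon_mem s
    rw [pvRots4_eq] at hm hm'
    have hip : ∃ i < 4, pvRotIter i p = pvCanon p := by
      simp only [List.mem_cons, List.not_mem_nil, or_false] at hm
      rcases hm with h | h | h | h
      · exact ⟨0, by omega, h.symm⟩
      · exact ⟨1, by omega, h.symm⟩
      · exact ⟨2, by omega, h.symm⟩
      · exact ⟨3, by omega, h.symm⟩
    have hjs : ∃ j < 4, pvRotIter j s = pvCanon s := by
      simp only [List.mem_cons, List.not_mem_nil, or_false] at hm'
      rcases hm' with h | h | h | h
      · exact ⟨0, by omega, h.symm⟩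
      · exact ⟨1, by omega, h.symm⟩
      · exact ⟨2, by omega, h.symm⟩
      · exact ⟨3, by omega, h.symm⟩
    obtain ⟨i, hi4, hi⟩ := hip
    obtain ⟨j, hj4, hj⟩ := hjs
    refine ⟨(4 - j + i) % 4, Nat.mod_lt _ (by omega), ?_⟩
    rw [← pvRotIter_mod _ hp, ← pvRotIter_add (4 - j) i, hi, he, ← hj,
      pvRotIter_add, show 4 - j + j = 4 by omega, pvRotIter_four hs]
  · rintro ⟨k, hk, rfl⟩
    exact (pvCanon_rotIter k hp).symm

theorem pvCanon_length (s : List (Int × Int)) : (pvCanon s).length = s.length := by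
  have hm := pvCanon_mem s
  simp only [pvRots4, List.mem_cons, List.not_mem_nil, or_false] at hm
  rcases hm with h | h | h | h <;> simp [h, pvRotate_length]

-- ---------- the shapes produced by the scans are normalised ----------

theorem pvCellGet?_cellSet_self (board : List (List Int)) (x y v t0 : Int)
    (hx : 0 ≤ x) (hy : 0 ≤ y) (h : pvCellGet? board x y = some t0) :
    pvCellGet? (pvCellSet board x y v) x y = some v := by
  unfold pvCellGet? at h ⊢
  rw [PySem.List.pyGet?_of_nonneg _ hx] at h
  rcases hrow : board[x.toNat]? with _ | row
  · rw [hrow] at h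
    exact absurd h (by simp)
  rw [hrow] at h
  simp only at h
  rw [PySem.List.pyGet?_of_nonneg _ hy] at h
  have hxl : x.toNat < board.length := by
    by_contra hc
    rw [List.getElem?_eq_none (by omega)] at hrow
    exact absurd hrow (by simp)
  have hyl : y.toNat < row.length := by
    by_contra hc
    rw [List.getElem?_eq_none (by omega)] at h
    exact absurd h (by simp)
  unfold pvCellSet
  rw [PySem.List.pySetD_of_nonneg _ _ hx, PySem.List.pySetD_of_nonneg _ _ hy]
  have hgd : PySem.List.pyGetD board x [] = row := by
    rw [PySem.List.pyGetD_eq_getElem _ _ hx (by omega)]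
    rw [List.getElem?_eq_getElem hxl] at hrow
    exact Option.some_injective _ hrow
  rw [hgd, PySem.List.pyGet?_of_nonneg _ hx]
  rw [List.getElem?_set_self (by simpa using hxl)]
  simp only
  rw [PySem.List.pyGet?_of_nonneg _ hy]
  rw [List.getElem?_set_self (by simpa using hyl)]

theorem pvCellGet?_cellSet_ne (board : List (List Int)) (x y a b v t0 : Int)
    (hx : 0 ≤ x) (hy : 0 ≤ y) (ha : 0 ≤ a) (hb : 0 ≤ b)
    (h : pvCellGet? board x y = some t0) (hne : (a, b) ≠ (x, y)) :
    pvCellGet? (pvCellSet board x y v) a b = pvCellGet? board a b := by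
  unfold pvCellGet? at h ⊢
  rw [PySem.List.pyGet?_of_nonneg _ hx] at h
  rcases hrow : board[x.toNat]? with _ | row
  · rw [hrow] at h
    exact absurd h (by simp)
  rw [hrow] at h
  simp only at h
  rw [PySem.List.pyGet?_of_nonneg _ hy] at h
  have hxl : x.toNat < board.length := by
    by_contra hc
    rw [List.getElem?_eq_none (by omega)] at hrow
    exact absurd hrow (by simp)
  have hyl : y.toNat < row.length := by
    by_contra hc
    rw [List.getElem?_eq_none (by omega)] at h
    exact absurd h (by simp)
  have hgd : PySem.List.pyGetD board x [] = row := by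
    rw [PySem.List.pyGetD_eq_getElem _ _ hx (by omega)]
    rw [List.getElem?_eq_getElem hxl] at hrow
    exact Option.some_injective _ hrow
  unfold pvCellSet
  rw [PySem.List.pySetD_of_nonneg _ _ hx, PySem.List.pySetD_of_nonneg _ _ hy, hgd]
  rw [PySem.List.pyGet?_of_nonneg _ ha, PySem.List.pyGet?_of_nonneg _ ha]
  by_cases hax : x.toNat = a.toNat
  · have haeq : a = x := by omega
    subst haeq
    have hby : y.toNat ≠ b.toNat := by
      intro hc
      exact hne (by simp [Prod.ext_iff] <;> omega)
    rw [List.getElem?_set_self (by simpa using hxl)]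
    rw [List.getElem?_eq_getElem hxl]
    simp only
    rw [PySem.List.pyGet?_of_nonneg _ hb, PySem.List.pyGet?_of_nonneg _ hb]
    rw [List.getElem?_set_ne hby]
    rw [List.getElem?_eq_getElem hxl] at hrow
    rw [Option.some_injective _ hrow]
  · rw [List.getElem?_set_ne hax]

def pvInv (target : Int) (board : List (List Int)) (result : List (Int × Int)) : Prop :=
  result.Nodup ∧ (∀ c ∈ result, 0 ≤ c.1 ∧ 0 ≤ c.2) ∧
    (∀ c ∈ result, pvCellGet? board c.1 c.2 ≠ some target) ∧ result ≠ []

theorem pvVisit_inv (n target : Int) (st : List (List Int) × List (Int × Int) × List (Int × Int))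
    (nb : Int × Int) (h : pvInv target st.1 st.2.1) :
    pvInv target (pvVisit n target st nb).1 (pvVisit n target st nb).2.1 := by
  unfold pvVisit
  split
  · next hguard =>
    simp only [Bool.and_eq_true, decide_eq_true_eq, beq_iff_eq] at hguard
    obtain ⟨⟨⟨⟨h1, h2⟩, h3⟩, h4⟩, hcell⟩ := hguard
    obtain ⟨hnd, hpos, hne', hnil⟩ := h
    have hnb : nb ∉ st.2.1 := fun hmem => hne' nb hmem hcell
    refine ⟨?_, ?_, ?_, by
      intro he
      have he' : st.2.1 ++ [nb] = [] := he
      have hlen2 : (st.2.1 ++ [nb]).length = 0 := by rw [he']; rfl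
      rw [List.length_append, List.length_cons, List.length_nil] at hlen2
      omega⟩
    · rw [List.nodup_append]
      refine ⟨hnd, List.nodup_singleton nb, ?_⟩
      intro a ha b hbmem
      have hab : b = nb := by simpa using hbmem
      subst hab
      exact fun he => hnb (he ▸ ha)
    · intro c hc
      rcases List.mem_append.mp hc with hcl | hcr
      · exact hpos c hcl
      · simp only [List.mem_singleton] at hcr
        subst hcr
        exact ⟨h1, h3⟩
    · intro c hc
      rcases List.mem_append.mp hc with hcl | hcr
      · have hcne : ((c.1, c.2) : Int × Int) ≠ (nb.1, nb.2) := by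
          intro he
          apply hnb
          have hce : c = nb := by
            cases c
            cases nb
            simpa using he
          rw [← hce]
          exact hcl
        rw [pvCellGet?_cellSet_ne st.1 nb.1 nb.2 c.1 c.2 (1 - target) target h1 h3
          (hpos c hcl).1 (hpos c hcl).2 hcell hcne]
        exact hne' c hcl
      · simp only [List.mem_singleton] at hcr
        rw [hcr]
        rw [pvCellGet?_cellSet_self st.1 nb.1 nb.2 (1 - target) target h1 h3 hcell]
        intro hsome
        simp only [Option.some.injEq] at hsome
        omega
  · exact h

theorem pvFold_inv (n target : Int) (nbs : List (Int × Int))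
    (st : List (List Int) × List (Int × Int) × List (Int × Int))
    (h : pvInv target st.1 st.2.1) :
    pvInv target (nbs.foldl (pvVisit n target) st).1 (nbs.foldl (pvVisit n target) st).2.1 := by
  induction nbs generalizing st with
  | nil => simpa using h
  | cons nb nbs ih =>
    simp only [List.foldl_cons]
    exact ih _ (pvVisit_inv n target st nb h)

theorem pvBfsLoop_inv (n target : Int) (board : List (List Int)) (q result : List (Int × Int))
    (h : pvInv target board result) :
    (pvBfsLoop n target board q result).2.Nodup ∧ (pvBfsLoop n target board q result).2 ≠ [] := by
  induction board, q, result using pvBfsLoop.induct n target with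
  | case1 board result =>
    rw [pvBfsLoop]
    exact ⟨h.1, h.2.2.2⟩
  | case2 board x y q' result st ih =>
    rw [pvBfsLoop]
    exact ih (pvFold_inv n target _ _ h)

theorem pvBfs_N (board : List (List Int)) (n x y target : Int)
    (hx : 0 ≤ x) (hy : 0 ≤ y) (hcell : pvCellGet? board x y = some target) :
    pvN (pvBfs board n x y target).2 := by
  show pvN (pvNorm (pvBfsLoop n target (pvCellSet board x y (1 - target)) [(x, y)] [(x, y)]).2)
  have hinv : pvInv target (pvCellSet board x y (1 - target)) [(x, y)] := by
    refine ⟨by simp, ?_, ?_, by simp⟩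
    · intro c hc
      simp only [List.mem_singleton] at hc
      subst hc
      exact ⟨hx, hy⟩
    · intro c hc
      simp only [List.mem_singleton] at hc
      subst hc
      show pvCellGet? (pvCellSet board x y (1 - target)) x y ≠ some target
      rw [pvCellGet?_cellSet_self board x y (1 - target) target hx hy hcell]
      intro hsome
      simp only [Option.some.injEq] at hsome
      omega
  have hres := pvBfsLoop_inv n target _ [(x, y)] [(x, y)] hinv
  exact pvNorm_N _ hres.2 hres.1

theorem pvPieces_N (board : List (List Int)) (n target : Int) :
    ∀ s ∈ (pvPieces board n target).2, pvN s := by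
  have inner : ∀ (js : List Int) (i : Int), 0 ≤ i → (∀ j ∈ js, 0 ≤ j) →
      ∀ (st : List (List Int) × List (List (Int × Int))), (∀ s ∈ st.2, pvN s) →
      ∀ s ∈ (js.foldl (fun st j =>
        if pvCellGet? st.1 i j == some target then
          let r := pvBfs st.1 n i j target
          (r.1, st.2 ++ [r.2])
        else st) st).2, pvN s := by
    intro js
    induction js with
    | nil =>
      intro i _ _ st hst
      simpa using hst
    | cons j js ih =>
      intro i hi hjs st hst
      simp only [List.foldl_cons]
      apply ih i hi (fun j' hj' => hjs j' (by simp [hj']))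
      by_cases hc : (pvCellGet? st.1 i j == some target) = true
      · rw [if_pos hc]
        intro s hs
        rcases List.mem_append.mp hs with h1 | h2
        · exact hst s h1
        · simp only [List.mem_singleton] at h2
          subst h2
          exact pvBfs_N st.1 n i j target hi (hjs j (by simp)) (by simpa using hc)
      · rw [if_neg hc]
        exact hst
  have outer : ∀ (is_ : List Int), (∀ i ∈ is_, 0 ≤ i) →
      ∀ (st : List (List Int) × List (List (Int × Int))), (∀ s ∈ st.2, pvN s) →
      ∀ s ∈ (is_.foldl (fun st i =>
        (PySem.List.pyRange 0 n 1).foldl (fun st j =>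
          if pvCellGet? st.1 i j == some target then
            let r := pvBfs st.1 n i j target
            (r.1, st.2 ++ [r.2])
          else st) st) st).2, pvN s := by
    intro is_
    induction is_ with
    | nil =>
      intro _ st hst
      simpa using hst
    | cons i is_ ih =>
      intro his st hst
      simp only [List.foldl_cons]
      apply ih (fun i' h => his i' (by simp [h]))
      exact inner (PySem.List.pyRange 0 n 1) i (his i (by simp))
        (fun j hj => (PySem.List.mem_pyRange_one.mp hj).1) st hst
  unfold pvPieces
  apply outer
  · intro i hi
    exact (PySem.List.mem_pyRange_one.mp hi).1
  · simp

-- ---------- A's rotation scan ----------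

def pvRotHit (space puzzle : List (Int × Int)) : Bool :=
  ((PySem.List.pyRange 0 4 1).foldl
    (fun (d : List (Int × Int) × Bool) _ =>
      if d.2 then d
      else if d.1 == space then (d.1, true)
      else (pvRotate d.1, false)) (puzzle, false)).2

theorem pvRotIter_one (s : List (Int × Int)) : pvRotIter 1 s = pvRotate s := rfl
theorem pvRotIter_two (s : List (Int × Int)) : pvRotIter 2 s = pvRotate (pvRotate s) := rfl
theorem pvRotIter_three (s : List (Int × Int)) :
    pvRotIter 3 s = pvRotate (pvRotate (pvRotate s)) := rfl

theorem pvRotHit_eq_or (space puzzle : List (Int × Int)) :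
    pvRotHit space puzzle = true ↔ (puzzle = space ∨ pvRotate puzzle = space ∨
      pvRotate (pvRotate puzzle) = space ∨ pvRotate (pvRotate (pvRotate puzzle)) = space) := by
  unfold pvRotHit
  rw [show PySem.List.pyRange 0 4 1 = [0, 1, 2, 3] from by decide]
  by_cases h0 : puzzle = space <;>
    by_cases h1 : pvRotate puzzle = space <;>
      by_cases h2 : pvRotate (pvRotate puzzle) = space <;>
        by_cases h3 : pvRotate (pvRotate (pvRotate puzzle)) = space <;>
          simp [List.foldl, h0, h1, h2, h3]

theorem pvRotHit_iff (space puzzle : List (Int × Int)) :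
    pvRotHit space puzzle = true ↔ ∃ k < 4, pvRotIter k puzzle = space := by
  rw [pvRotHit_eq_or]
  constructor
  · rintro (h | h | h | h)
    · exact ⟨0, by omega, h⟩
    · exact ⟨1, by omega, by rw [pvRotIter_one]; exact h⟩
    · exact ⟨2, by omega, by rw [pvRotIter_two]; exact h⟩
    · exact ⟨3, by omega, by rw [pvRotIter_three]; exact h⟩
  · rintro ⟨k, hk, he⟩
    interval_cases k
    · exact Or.inl he
    · exact Or.inr (Or.inl (by rw [← pvRotIter_one]; exact he))
    · exact Or.inr (Or.inr (Or.inl (by rw [← pvRotIter_two]; exact he)))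
    · exact Or.inr (Or.inr (Or.inr (by rw [← pvRotIter_three]; exact he)))

theorem pvRotHit_iff_canon {space puzzle : List (Int × Int)} (hp : pvN puzzle) (hs : pvN space) :
    pvRotHit space puzzle = true ↔ pvCanon puzzle = pvCanon space := by
  rw [pvRotHit_iff]
  exact (pvCanon_eq_iff hp hs).symm

-- ---------- greedy matching = per-class minimum counting ----------

def pvExtract (c : List (Int × Int)) :
    List (List (Int × Int)) → Option ((List (Int × Int)) × List (List (Int × Int)))
  | [] => none
  | p :: rest =>
    if pvCanon p = c then some (p, rest)
    else (pvExtract c rest).map (fun r => (r.1, p :: r.2))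

def pvGref (ss ps : List (List (Int × Int))) : Int :=
  match ss with
  | [] => 0
  | s :: ss' =>
    match pvExtract (pvCanon s) ps with
    | none => pvGref ss' ps
    | some r => PySem.List.len r.1 + pvGref ss' r.2

def pvRemaining (P : List (List (Int × Int))) (u : List Bool) : List (List (Int × Int)) :=
  (P.zip u).filterMap (fun pb => if pb.2 then none else some pb.1)

theorem pvExtract_none_iff (c : List (Int × Int)) (ps : List (List (Int × Int))) :
    pvExtract c ps = none ↔ ∀ p ∈ ps, pvCanon p ≠ c := by
  induction ps with
  | nil => simp [pvExtract]
  | cons p rest ih =>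
    rw [show pvExtract c (p :: rest) = (if pvCanon p = c then some (p, rest)
      else (pvExtract c rest).map (fun r => (r.1, p :: r.2))) from rfl]
    by_cases h : pvCanon p = c
    · rw [if_pos h]
      simp [List.forall_mem_cons, h]
    · rw [if_neg h]
      rcases hE : pvExtract c rest with _ | r
      · constructor
        · intro _ q hq
          rcases List.mem_cons.mp hq with rfl | hq'
          · exact h
          · exact ih.mp hE q hq'
        · intro _
          rfl
      · have hr : ¬ ∀ q ∈ rest, pvCanon q ≠ c := by
          rw [← ih]
          simp [hE]
        constructor
        · intro hcontra
          simp at hcontra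
        · intro hall
          exact absurd (fun q hq => hall q (by simp [hq])) hr

theorem pvExtract_some (c : List (Int × Int)) (ps : List (List (Int × Int)))
    (p : List (Int × Int)) (ps' : List (List (Int × Int)))
    (h : pvExtract c ps = some (p, ps')) :
    pvCanon p = c ∧ p ∈ ps ∧ (∀ q ∈ ps', q ∈ ps) ∧
      ps'.map pvCanon = (ps.map pvCanon).erase c := by
  induction ps generalizing p ps' with
  | nil => simp [pvExtract] at h
  | cons q rest ih =>
    rw [show pvExtract c (q :: rest) = (if pvCanon q = c then some (q, rest)
      else (pvExtract c rest).map (fun r => (r.1, q :: r.2))) from rfl] at h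
    by_cases hq : pvCanon q = c
    · rw [if_pos hq] at h
      simp only [Option.some.injEq, Prod.mk.injEq] at h
      obtain ⟨rfl, rfl⟩ := h
      refine ⟨hq, by simp, fun q' hq' => by simp [hq'], ?_⟩
      simp only [List.map_cons]
      rw [← hq, List.erase_cons_head]
    · rw [if_neg hq] at h
      rcases hE : pvExtract c rest with _ | r
      · rw [hE] at h
        simp at h
      · rw [hE] at h
        rcases r with ⟨p0, rest0⟩
        simp only [Option.map_some, Option.some.injEq, Prod.mk.injEq] at h
        obtain ⟨rfl, rfl⟩ := h
        obtain ⟨h1, h2, h3, h4⟩ := ih p0 rest0 hE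
        refine ⟨h1, by simp [h2], ?_, ?_⟩
        · intro q' hq'
          rcases List.mem_cons.mp hq' with rfl | hq''
          · simp
          · simp [h3 q' hq'']
        · simp only [List.map_cons]
          rw [List.erase_cons_tail (by simp [hq]), h4]

theorem pvSet_getElem_ne (l : List Bool) (i j : Nat) (a : Bool) (hne : i ≠ j)
    (hj : j < l.length) : (l.set i a)[j]'(by simpa using hj) = l[j] := by
  induction l generalizing i j with
  | nil => simp at hj
  | cons b l ih =>
    cases i with
    | zero =>
      cases j with
      | zero => omega
      | succ j => simp [List.set]
    | succ i =>
      cases j with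
      | zero => simp [List.set]
      | succ j =>
        simp only [List.set, List.getElem_cons_succ]
        exact ih i j (by omega) (by simpa using hj)

theorem pvSet_getElem_self (l : List Bool) (j : Nat) (a : Bool) (hj : j < l.length) :
    (l.set j a)[j]'(by simpa using hj) = a := by
  induction l generalizing j with
  | nil => simp at hj
  | cons b l ih =>
    cases j with
    | zero => simp [List.set]
    | succ j =>
      simp only [List.set, List.getElem_cons_succ]
      exact ih j (by simpa using hj)

theorem pvRemaining_cons (p : List (Int × Int)) (P : List (List (Int × Int)))
    (b : Bool) (u : List Bool) :
    pvRemaining (p :: P) (b :: u) = if b then pvRemaining P u else p :: pvRemaining P u := by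
  cases b <;> simp [pvRemaining]

theorem pvDrop_set_lt (l : List Bool) (i j : Nat) (a : Bool) (h : i < j) :
    (l.set i a).drop j = l.drop j := by
  induction l generalizing i j with
  | nil => simp
  | cons b l ih =>
    cases i with
    | zero =>
      cases j with
      | zero => omega
      | succ j => simp [List.set]
    | succ i =>
      cases j with
      | zero => omega
      | succ j =>
        simp only [List.set, List.drop_succ_cons]
        exact ih i j (by omega)

theorem pvRemaining_replicate (P : List (List (Int × Int))) :
    pvRemaining P (List.replicate P.length false) = P := by
  induction P with
  | nil => simp [pvRemaining]
  | cons p P ih => simp [List.replicate_succ, pvRemaining_cons, ih]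

-- the matching fold of A's port, named for the proofs (identical text)
def pvIBody (space : List (Int × Int)) (puzzles : List (List (Int × Int))) :
    (Int × List Bool × Bool) → Int → (Int × List Bool × Bool) := fun t i =>
  if t.2.2 then t
  else
    let puzzle := PySem.List.pyGetD puzzles i []
    if PySem.List.pyGetD t.2.1 i false ||
        !(PySem.List.len space == PySem.List.len puzzle) then t
    else
      let hit := ((PySem.List.pyRange 0 4 1).foldl
        (fun (d : List (Int × Int) × Bool) _ =>
          if d.2 then d
          else if d.1 == space then (d.1, true)
          else (pvRotate d.1, false)) (puzzle, false)).2
      if hit then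
        (t.1 + PySem.List.len puzzle, PySem.List.pySetD t.2.1 i true, true)
      else t

def pvInner (space : List (Int × Int)) (puzzles : List (List (Int × Int)))
    (ans : Int) (used : List Bool) : Int × List Bool × Bool :=
  (PySem.List.pyRange 0 (PySem.List.len puzzles) 1).foldl (pvIBody space puzzles)
    (ans, used, false)

theorem pvIBody_false (space : List (Int × Int)) (P : List (List (Int × Int)))
    (ans : Int) (used : List Bool) (i : Int) :
    pvIBody space P (ans, used, false) i =
      (if PySem.List.pyGetD used i false ||
          !(PySem.List.len space == PySem.List.len (PySem.List.pyGetD P i [])) then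
        (ans, used, false)
      else if pvRotHit space (PySem.List.pyGetD P i []) then
        (ans + PySem.List.len (PySem.List.pyGetD P i []), PySem.List.pySetD used i true, true)
      else (ans, used, false)) := rfl

theorem pvFoldTrue (space : List (Int × Int)) (P : List (List (Int × Int)))
    (l : List Int) (ans : Int) (used : List Bool) :
    l.foldl (pvIBody space P) (ans, used, true) = (ans, used, true) := by
  induction l with
  | nil => rfl
  | cons i l ih =>
    rw [List.foldl_cons, show pvIBody space P (ans, used, true) i = (ans, used, true) from rfl]
    exact ih

theorem pvInnerFrom (space : List (Int × Int)) (P : List (List (Int × Int)))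
    (hNs : pvN space) (hNP : ∀ p ∈ P, pvN p) :
    ∀ (j k : Nat), k + j = P.length → ∀ (ans : Int) (used : List Bool),
      used.length = P.length →
    (pvExtract (pvCanon space) (pvRemaining (P.drop k) (used.drop k)) = none ∧
      (PySem.List.pyRange (k : Int) (PySem.List.len P) 1).foldl (pvIBody space P)
        (ans, used, false) = (ans, used, false)) ∨
    (∃ p ps' i0, pvExtract (pvCanon space) (pvRemaining (P.drop k) (used.drop k)) = some (p, ps') ∧
      k ≤ i0 ∧ i0 < P.length ∧
      (PySem.List.pyRange (k : Int) (PySem.List.len P) 1).foldl (pvIBody space P)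
        (ans, used, false) = (ans + PySem.List.len p, used.set i0 true, true) ∧
      pvRemaining (P.drop k) ((used.set i0 true).drop k) = ps') := by
  intro j
  induction j with
  | zero =>
    intro k hk ans used hlen
    left
    have hk' : k = P.length := by omega
    subst hk'
    have hnil : PySem.List.pyRange (P.length : Int) (PySem.List.len P) 1 = [] := by
      apply PySem.List.pyRange_one_eq_nil
      simp [PySem.List.len_eq]
    rw [hnil, List.drop_length]
    exact ⟨by simp [pvRemaining, pvExtract], rfl⟩
  | succ j ih =>
    intro k hk ans used hlen
    have hkP : k < P.length := by omega
    have hkU : k < used.length := by omega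
    have hcons : PySem.List.pyRange (k : Int) (PySem.List.len P) 1
        = (k : Int) :: PySem.List.pyRange ((k : Int) + 1) (PySem.List.len P) 1 := by
      apply PySem.List.pyRange_one_cons
      simp only [PySem.List.len_eq]
      exact_mod_cast hkP
    have hcast : ((k : Int) + 1) = ((k + 1 : Nat) : Int) := by push_cast; ring
    have hgetP : PySem.List.pyGetD P (k : Int) [] = P[k] := by
      rw [PySem.List.pyGetD_natCast]
      exact List.getD_eq_getElem _ _ hkP
    have hgetU : PySem.List.pyGetD used (k : Int) false = used[k] := by
      rw [PySem.List.pyGetD_natCast]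
      exact List.getD_eq_getElem _ _ hkU
    have hsetU : PySem.List.pySetD used (k : Int) true = used.set k true := by simp
    have hPd : P.drop k = P[k] :: P.drop (k + 1) := List.drop_eq_getElem_cons hkP
    have hud : used.drop k = used[k] :: used.drop (k + 1) := List.drop_eq_getElem_cons hkU
    rw [hcons, List.foldl_cons, pvIBody_false]
    by_cases hu : used[k] = true
    · have hcond : (PySem.List.pyGetD used (k : Int) false ||
          !(PySem.List.len space == PySem.List.len (PySem.List.pyGetD P (k : Int) []))) = true := by
        rw [hgetU, hu]
        simp
      rw [if_pos hcond, hcast]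
      rcases ih (k + 1) (by omega) ans used hlen with ⟨hnone, hfold⟩ |
        ⟨p, ps', i0, hext, hi0k, hi0P, hfold, hrem⟩
      · left
        refine ⟨?_, hfold⟩
        rw [hPd, hud, pvRemaining_cons, if_pos hu]
        exact hnone
      · right
        refine ⟨p, ps', i0, ?_, by omega, hi0P, hfold, ?_⟩
        · rw [hPd, hud, pvRemaining_cons, if_pos hu]
          exact hext
        · rw [hPd]
          have hds : (used.set i0 true).drop k = used[k] :: (used.set i0 true).drop (k + 1) := by
            rw [List.drop_eq_getElem_cons (by simp [hkU])]
            congr 1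
            exact pvSet_getElem_ne used i0 k true (fun he => by omega) hkU
          rw [hds, pvRemaining_cons, if_pos hu]
          exact hrem
    · have hu' : used[k] = false := by simpa using hu
      by_cases hL : space.length = (P[k]).length
      · -- lengths equal: the rotation scan decides
        have hcond : (PySem.List.pyGetD used (k : Int) false ||
            !(PySem.List.len space == PySem.List.len (PySem.List.pyGetD P (k : Int) []))) = false := by
          rw [hgetU, hu', hgetP]
          simp only [PySem.List.len_eq, Bool.false_or, Bool.not_eq_false']
          exact beq_iff_eq.mpr (by exact_mod_cast hL)
        rw [if_neg (by rw [hcond]; exact Bool.false_ne_true)]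
        by_cases hhit : pvRotHit space P[k] = true
        · have hcondh : pvRotHit space (PySem.List.pyGetD P (k : Int) []) = true := by
            rw [hgetP]
            exact hhit
          rw [if_pos hcondh, hgetP, hsetU, pvFoldTrue]
          right
          have hcanon : pvCanon P[k] = pvCanon space :=
            (pvRotHit_iff_canon (hNP _ (List.getElem_mem hkP)) hNs).mp hhit
          refine ⟨P[k], pvRemaining (P.drop (k + 1)) (used.drop (k + 1)), k, ?_, le_refl k,
            hkP, rfl, ?_⟩
          · rw [hPd, hud, pvRemaining_cons, if_neg (by simp [hu'])]
            simp only [pvExtract]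
            rw [if_pos hcanon]
          · rw [hPd]
            have hds : (used.set k true).drop k = true :: (used.set k true).drop (k + 1) := by
              rw [List.drop_eq_getElem_cons (by simp [hkU])]
              congr 1
              exact pvSet_getElem_self used k true hkU
            rw [hds, pvRemaining_cons, if_pos rfl, pvDrop_set_lt used k (k + 1) true (by omega)]
        · rw [if_neg (by rw [hgetP]; exact hhit), hcast]
          have hnotc : pvCanon P[k] ≠ pvCanon space := by
            intro he
            exact hhit ((pvRotHit_iff_canon (hNP _ (List.getElem_mem hkP)) hNs).mpr he)
          rcases ih (k + 1) (by omega) ans used hlen with ⟨hnone, hfold⟩ |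
            ⟨p, ps', i0, hext, hi0k, hi0P, hfold, hrem⟩
          · left
            refine ⟨?_, hfold⟩
            rw [hPd, hud, pvRemaining_cons, if_neg (by simp [hu'])]
            simp only [pvExtract]
            rw [if_neg hnotc, hnone]
            rfl
          · right
            refine ⟨p, P[k] :: ps', i0, ?_, by omega, hi0P, hfold, ?_⟩
            · rw [hPd, hud, pvRemaining_cons, if_neg (by simp [hu'])]
              simp only [pvExtract]
              rw [if_neg hnotc, hext]
              rfl
            · rw [hPd]
              have hds : (used.set i0 true).drop k = used[k] :: (used.set i0 true).drop (k + 1) := by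
                rw [List.drop_eq_getElem_cons (by simp [hkU])]
                congr 1
                exact pvSet_getElem_ne used i0 k true (fun he => by omega) hkU
              rw [hds, pvRemaining_cons, if_neg (by simp [hu']), hrem]
      · -- length mismatch: skipped, and the head cannot be canon-equal either
        have hcond : (PySem.List.pyGetD used (k : Int) false ||
            !(PySem.List.len space == PySem.List.len (PySem.List.pyGetD P (k : Int) []))) = true := by
          rw [hgetU, hu', hgetP]
          simp only [PySem.List.len_eq, Bool.false_or, Bool.not_eq_true']
          exact beq_eq_false_iff_ne.mpr (by
            intro hc
            exact hL (by exact_mod_cast hc))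
        rw [if_pos hcond, hcast]
        have hnotc : pvCanon P[k] ≠ pvCanon space := by
          intro he
          apply hL
          calc space.length = (pvCanon space).length := (pvCanon_length space).symm
            _ = (pvCanon P[k]).length := by rw [he]
            _ = (P[k]).length := pvCanon_length _
        rcases ih (k + 1) (by omega) ans used hlen with ⟨hnone, hfold⟩ |
          ⟨p, ps', i0, hext, hi0k, hi0P, hfold, hrem⟩
        · left
          refine ⟨?_, hfold⟩
          rw [hPd, hud, pvRemaining_cons, if_neg (by simp [hu'])]
          simp only [pvExtract]
          rw [if_neg hnotc, hnone]
          rfl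
        · right
          refine ⟨p, P[k] :: ps', i0, ?_, by omega, hi0P, hfold, ?_⟩
          · rw [hPd, hud, pvRemaining_cons, if_neg (by simp [hu'])]
            simp only [pvExtract]
            rw [if_neg hnotc, hext]
            rfl
          · rw [hPd]
            have hds : (used.set i0 true).drop k = used[k] :: (used.set i0 true).drop (k + 1) := by
              rw [List.drop_eq_getElem_cons (by simp [hkU])]
              congr 1
              exact pvSet_getElem_ne used i0 k true (fun he => by omega) hkU
            rw [hds, pvRemaining_cons, if_neg (by simp [hu']), hrem]

theorem pvInner_spec (space : List (Int × Int)) (P : List (List (Int × Int)))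
    (ans : Int) (used : List Bool) (hlen : used.length = P.length)
    (hNs : pvN space) (hNP : ∀ p ∈ P, pvN p) :
    (pvExtract (pvCanon space) (pvRemaining P used) = none ∧
      pvInner space P ans used = (ans, used, false)) ∨
    (∃ p ps' i0, pvExtract (pvCanon space) (pvRemaining P used) = some (p, ps') ∧
      i0 < P.length ∧
      pvInner space P ans used = (ans + PySem.List.len p, used.set i0 true, true) ∧
      pvRemaining P (used.set i0 true) = ps') := by
  have h := pvInnerFrom space P hNs hNP P.length 0 (by omega) ans used hlen
  rw [show ((0 : Nat) : Int) = 0 by simp] at h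
  simp only [List.drop_zero] at h
  unfold pvInner
  rcases h with ⟨hnone, hfold⟩ | ⟨p, ps', i0, hext, _, hi0, hfold, hrem⟩
  · left
    exact ⟨hnone, hfold⟩
  · right
    exact ⟨p, ps', i0, hext, hi0, hfold, hrem⟩

theorem pvOuter_spec (P : List (List (Int × Int))) (hNP : ∀ p ∈ P, pvN p) :
    ∀ (ss : List (List (Int × Int))) (ans : Int) (used : List Bool),
      used.length = P.length → (∀ s ∈ ss, pvN s) →
      (ss.foldl (fun (st : Int × List Bool) space =>
        let inner := pvInner space P st.1 st.2
        (inner.1, inner.2.1)) (ans, used)).1 = ans + pvGref ss (pvRemaining P used) := by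
  intro ss
  induction ss with
  | nil =>
    intro ans used _ _
    simp [pvGref]
  | cons s ss ih =>
    intro ans used hlen hNs
    rw [List.foldl_cons]
    rcases pvInner_spec s P ans used hlen (hNs s (by simp)) hNP with ⟨hnone, hinner⟩ |
      ⟨p, ps', i0, hext, hi0, hinner, hrem⟩
    · rw [show pvGref (s :: ss) (pvRemaining P used) = pvGref ss (pvRemaining P used) from by
        simp [pvGref, hnone]]
      rw [← ih ans used hlen (fun s' h => hNs s' (by simp [h]))]
      rw [hinner]
    · rw [show pvGref (s :: ss) (pvRemaining P used) = PySem.List.len p + pvGref ss ps' from by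
        simp [pvGref, hext]]
      rw [← hrem]
      rw [show ans + (PySem.List.len p + pvGref ss (pvRemaining P (used.set i0 true)))
          = (ans + PySem.List.len p) + pvGref ss (pvRemaining P (used.set i0 true)) from by ring]
      rw [← ih (ans + PySem.List.len p) (used.set i0 true) (by simp [hlen])
        (fun s' h => hNs s' (by simp [h]))]
      rw [hinner]

-- ---------- the B side as a keyed sum ----------

def pvF (keys cs cp : List (List (Int × Int))) : Int :=
  (keys.map (fun k => min ((cs.count k : Int)) ((cp.count k : Int)) * PySem.List.len k)).sum

theorem pvAlt_eq (game_board table : List (List Int)) :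
    solution_alt game_board table =
      pvF (PySem.Set.ofList (((pvPieces game_board (PySem.List.len table) 0).2).map pvCanon))
        (((pvPieces game_board (PySem.List.len table) 0).2).map pvCanon)
        (((pvPieces table (PySem.List.len table) 1).2).map pvCanon) := by
  unfold solution_alt pvF
  simp only [pvPiecesB_eq, PySem.Dict.items_counter, PySem.Dict.getD_counter,
    List.map_map, Function.comp]
  rfl

theorem pvSum_update (keys : List (List (Int × Int))) (c : List (Int × Int))
    (f g : List (Int × Int) → Int) (d : Int) (hnd : keys.Nodup) (hc : c ∈ keys)
    (hfg : ∀ k ∈ keys, k ≠ c → f k = g k) (hfc : f c = g c + d) :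
    (keys.map f).sum = (keys.map g).sum + d := by
  induction keys with
  | nil => simp at hc
  | cons k keys ih =>
    simp only [List.map_cons, List.sum_cons]
    rcases List.mem_cons.mp hc with hck | hck
    · have hfc' : f k = g k + d := by
        rw [← hck]
        exact hfc
      have hrest : keys.map f = keys.map g := by
        apply List.map_congr_left
        intro k' hk'
        have hne : k' ≠ c := by
          intro he
          subst he
          rw [hck] at hk'
          exact (List.nodup_cons.mp hnd).1 hk'
        exact hfg k' (by simp [hk']) hne
      rw [hrest, hfc']
      ring
    · have hkc : k ≠ c := by
        intro he
        subst he
        exact (List.nodup_cons.mp hnd).1 hck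
      rw [hfg k (by simp) hkc,
        ih (List.nodup_cons.mp hnd).2 hck (fun k' h h2 => hfg k' (by simp [h]) h2)]
      ring

theorem pvGref_eq_F (ss : List (List (Int × Int))) :
    ∀ (ps keys : List (List (Int × Int))),
      (∀ s ∈ ss, pvN s) → (∀ p ∈ ps, pvN p) → keys.Nodup →
      (∀ s ∈ ss, pvCanon s ∈ keys) →
      pvGref ss ps = pvF keys (ss.map pvCanon) (ps.map pvCanon) := by
  induction ss with
  | nil =>
    intro ps keys _ _ _ _
    simp only [pvGref, pvF, List.map_nil]
    symm
    have hz : keys.map (fun k => min ((([] : List (List (Int × Int))).count k : Int))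
        (((ps.map pvCanon).count k : Int)) * PySem.List.len k) = keys.map (fun _ => 0) := by
      apply List.map_congr_left
      intro k _
      rw [List.count_nil, Nat.cast_zero, min_eq_left (by positivity), zero_mul]
    rw [hz]
    simp
  | cons s ss ih =>
    intro ps keys hNss hNps hnd hkeys
    rcases hE : pvExtract (pvCanon s) ps with _ | r
    · have hcnt : (ps.map pvCanon).count (pvCanon s) = 0 := by
        rw [List.count_eq_zero]
        intro hmem
        obtain ⟨p, hp, he⟩ := List.mem_map.mp hmem
        exact (pvExtract_none_iff _ _).mp hE p hp he
      rw [show pvGref (s :: ss) ps = pvGref ss ps from by simp [pvGref, hE]]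
      rw [ih ps keys (fun x h => hNss x (by simp [h])) hNps hnd
        (fun x h => hkeys x (by simp [h]))]
      unfold pvF
      congr 1
      apply List.map_congr_left
      intro k hk
      by_cases hks : k = pvCanon s
      · subst hks
        simp only [List.map_cons]
        rw [show List.count (pvCanon s) (pvCanon s :: List.map pvCanon ss)
            = List.count (pvCanon s) (List.map pvCanon ss) + 1 from by simp [List.count_cons]]
        rw [hcnt, Nat.cast_zero, min_eq_right (by positivity), min_eq_right (by positivity)]
      · simp only [List.map_cons]
        rw [show List.count k (pvCanon s :: List.map pvCanon ss)
            = List.count k (List.map pvCanon ss) from by simp [List.count_cons, hks, Ne.symm hks]]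
    · rcases r with ⟨p, ps'⟩
      obtain ⟨hcp, hpmem, hsub, hmap⟩ := pvExtract_some _ _ _ _ hE
      have hcnt : 1 ≤ (ps.map pvCanon).count (pvCanon s) := by
        by_contra hcon
        have h0 : (ps.map pvCanon).count (pvCanon s) = 0 := by omega
        rw [List.count_eq_zero] at h0
        exact h0 (List.mem_map.mpr ⟨p, hpmem, hcp⟩)
      rw [show pvGref (s :: ss) ps = PySem.List.len p + pvGref ss ps' from by
        simp [pvGref, hE]]
      rw [ih ps' keys (fun x h => hNss x (by simp [h])) (fun x h => hNps x (hsub x h)) hnd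
        (fun x h => hkeys x (by simp [h]))]
      unfold pvF
      rw [hmap]
      symm
      rw [show PySem.List.len p + (keys.map (fun k => min (((ss.map pvCanon).count k : Int))
          ((((ps.map pvCanon).erase (pvCanon s)).count k : Int)) * PySem.List.len k)).sum
          = (keys.map (fun k => min (((ss.map pvCanon).count k : Int))
          ((((ps.map pvCanon).erase (pvCanon s)).count k : Int)) * PySem.List.len k)).sum
          + PySem.List.len p from by ring]
      apply pvSum_update keys (pvCanon s) _ _ (PySem.List.len p) hnd (hkeys s (by simp))
      · intro k hk hkc
        simp only [List.map_cons]
        rw [show List.count k (pvCanon s :: List.map pvCanon ss)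
            = List.count k (List.map pvCanon ss) from by simp [List.count_cons, hkc, Ne.symm hkc]]
        rw [show List.count k ((List.map pvCanon ps).erase (pvCanon s))
            = List.count k (List.map pvCanon ps) from by
          simp [List.count_erase_of_ne, hkc, Ne.symm hkc]]
      · simp only [List.map_cons]
        rw [show List.count (pvCanon s) (pvCanon s :: List.map pvCanon ss)
            = List.count (pvCanon s) (List.map pvCanon ss) + 1 from by simp [List.count_cons]]
        rw [List.count_erase_self]
        have hlenp : PySem.List.len p = PySem.List.len (pvCanon s) := by
          simp only [PySem.List.len_eq]
          rw [← hcp, pvCanon_length]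
        rw [hlenp]
        have hmin : (min (((ss.map pvCanon).count (pvCanon s) + 1 : Nat) : Int)
            (((ps.map pvCanon).count (pvCanon s) : Nat) : Int))
            = min (((ss.map pvCanon).count (pvCanon s) : Nat) : Int)
              ((((ps.map pvCanon).count (pvCanon s) - 1 : Nat)) : Int) + 1 := by
          push_cast [Nat.cast_sub hcnt]
          omega
        push_cast
        push_cast at hmin
        rw [hmin]
        ring

-- ---------- assembling the two sides ----------

theorem pvSolution_eq_gref (game_board table : List (List Int)) :
    solution game_board table =
      pvGref ((pvPieces game_board (PySem.List.len table) 0).2)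
        ((pvPieces table (PySem.List.len table) 1).2) := by
  have hNP := pvPieces_N table (PySem.List.len table) 1
  have hNS := pvPieces_N game_board (PySem.List.len table) 0
  show (((pvPieces game_board (PySem.List.len table) 0).2).foldl
      (fun (st : Int × List Bool) space =>
        let inner := pvInner space ((pvPieces table (PySem.List.len table) 1).2) st.1 st.2
        (inner.1, inner.2.1))
      (0, List.replicate ((pvPieces table (PySem.List.len table) 1).2).length false)).1 = _
  rw [pvOuter_spec _ hNP _ 0 _ (by simp) hNS, pvRemaining_replicate]
  ring

theorem pvMain (game_board table : List (List Int)) :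
    solution game_board table = solution_alt game_board table := by
  rw [pvSolution_eq_gref, pvAlt_eq]
  apply pvGref_eq_F
  · exact pvPieces_N game_board (PySem.List.len table) 0
  · exact pvPieces_N table (PySem.List.len table) 1
  · exact PySem.Set.nodup_ofList _
  · intro x hx
    rw [PySem.Set.mem_ofList]
    exact List.mem_map.mpr ⟨x, hx, rfl⟩


-- ===== VERDICT (by name: the statement is the Claim_ definition above) =====
theorem solution_spec : Claim_equal_solution := by
  intro game_board table _hdom _hpre
  unfold Spec_solution
  exact pvMain game_board table
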